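-- pv_equiv track=rewrite | github.com/juanpedrovel/bomboclap | algorithms_and_data_structures/specialization/algorithmic_toolbox/answers/largest_number.py | best_num
-- ===== SOURCE A (Python) =====
-- def best_num(x, y):
--
--     if x == y:
--         return x
--
--     x = str(x)
--     y = str(y)
--
--     lx = len(x)
--     ly = len(y)
--
--     if lx == ly:
--         return max(x, y)
--
--     for i in range(min(lx, ly)):
--         if x[i] > y[i]:
--             return x
--         elif y[i] > x[i]:
--             return y
--
--     if lx > ly:
--         if best_num((x[ly:]), y) == y:
--             return y
--         else:
--             return x
--     else:
--         if best_num(x, y[lx:]) == x: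
--             return x
--         else:
--             return y
-- ===== SOURCE B (Python) =====
-- def best_num(x, y):
--     x, y = str(x), str(y)
--     return x if x + y >= y + x else y
-- ===== Notes on version B (the rewrite author's own statement) =====
-- stated objective: idiomatic
-- what changed: Replaces A's char-by-char prefix scan with recursion on the leftover suffix by the standard largest-number comparator: a single comparison of the two concatenations x+y vs y+x.
-- outside the precondition, e.g. on best_num('aa', 'a'): A returns 'a', B returns 'aa'; on best_num('aa', 'aaa'): A returns 'aaa', B returns 'aa'; on best_num('', 'a'): A raises RecursionError, B returns ''
import Mathlib
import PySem

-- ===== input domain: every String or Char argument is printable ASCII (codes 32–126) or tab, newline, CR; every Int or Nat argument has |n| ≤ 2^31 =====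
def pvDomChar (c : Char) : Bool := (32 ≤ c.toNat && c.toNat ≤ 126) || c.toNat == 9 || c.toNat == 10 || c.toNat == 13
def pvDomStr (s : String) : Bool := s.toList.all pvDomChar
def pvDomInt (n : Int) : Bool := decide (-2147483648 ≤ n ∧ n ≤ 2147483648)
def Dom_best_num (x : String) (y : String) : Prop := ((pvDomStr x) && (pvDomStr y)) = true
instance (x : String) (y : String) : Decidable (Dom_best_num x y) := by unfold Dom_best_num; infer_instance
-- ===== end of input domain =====

-- B replaces A's prefix-scan-and-recurse comparison with the standard largest-number
-- comparator (compare x+y with y+x once); idiomatic, same cost.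

-- Python's lexicographic '<' on strings, over code points (exact for all Chars).
def pvLexLt : List Char → List Char → Bool
  | [], [] => false
  | [], _ :: _ => true
  | _ :: _, [] => false
  | a :: as, b :: bs => if a < b then true else if b < a then false else pvLexLt as bs

-- ===== PORT A =====
-- the 'for i in range(min(lx, ly))' loop: some true = 'return x', some false = 'return y',
-- none = loop finished without returning
def pvScanA : List Char → List Char → Option Bool
  | a :: as, b :: bs =>
      if b < a then some true else if a < b then some false else pvScanA as bs
  | _, _ => none

-- A's recursion, with fuel: Python diverges (RecursionError) exactly where the fuel
-- could run out, and those inputs are outside Pre_best_num.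
def pvGoA : Nat → List Char → List Char → List Char
  | 0, _, _ => []        -- unreachable inside Pre_best_num (Python recurses forever here)
  | f + 1, a, b =>
      if a = b then a
      else if a.length = b.length then (if a < b then b else a)   -- max(x, y)
      else match pvScanA a b with
        | some true => a
        | some false => b
        | none =>
            if a.length > b.length then
              (if pvGoA f (a.drop b.length) b = b then b else a)
            else
              (if pvGoA f a (b.drop a.length) = a then a else b)

def best_num (x : String) (y : String) : String :=
  String.ofList (pvGoA (x.toList.length + y.toList.length + 1) x.toList y.toList)

-- ===== PORT B =====
def best_num_alt (x : String) (y : String) : String :=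
  if pvLexLt (x.toList ++ y.toList) (y.toList ++ x.toList) then y else x

-- ===== PRECONDITION & SPEC =====
-- Pre_ excludes concatenation ties x+y == y+x with x ≠ y: there A either diverges
-- (RecursionError when a string is empty) or returns an accidental pick between the two
-- equally valid tied arguments; B's '>=' tie-break (first argument) is as defensible.
def Pre_best_num (x : String) (y : String) : Prop :=
  x = y ∨ x.toList ++ y.toList ≠ y.toList ++ x.toList
instance (x : String) (y : String) : Decidable (Pre_best_num x y) := by
  unfold Pre_best_num; infer_instance

def pvWitness_best_num : String × String := ("34", "3")

def Spec_best_num (x : String) (y : String) (out : String) : Prop := out = best_num_alt x y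
instance (x : String) (y : String) (out : String) : Decidable (Spec_best_num x y out) := by
  unfold Spec_best_num; infer_instance

-- ===== CLAIM (what is proved, stated in full; the proofs are below) =====
def Claim_equal_best_num : Prop :=
  ∀ (x : String) (y : String), Dom_best_num x y → Pre_best_num x y →
    Spec_best_num x y (best_num x y)

-- ===== LEMMAS AND PROOFS =====

theorem pvLexLt_iff_lt (a b : List Char) : pvLexLt a b = true ↔ a < b := by
  induction a generalizing b with
  | nil => cases b <;> simp [pvLexLt, List.nil_lt_cons]
  | cons ca as ih =>
    cases b with
    | nil => simp [pvLexLt, List.not_lt_nil]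
    | cons cb bs =>
      rw [List.cons_lt_cons_iff]
      by_cases h1 : ca < cb
      · simp [pvLexLt, h1]
      · by_cases h2 : cb < ca
        · have hne : ca ≠ cb := fun h => h1 (h ▸ h2)
          simp only [pvLexLt, if_neg h1, if_pos h2]
          constructor
          · intro h; simp at h
          · rintro (h | ⟨h, _⟩)
            · exact absurd h h1
            · exact absurd h hne
        · have hc : ca = cb := le_antisymm (not_lt.mp h2) (not_lt.mp h1)
          subst hc
          simp [pvLexLt, ih]

theorem pvLexLt_irrefl (l : List Char) : pvLexLt l l = false := by
  induction l with
  | nil => rfl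
  | cons a as ih => simp [pvLexLt, ih]

theorem pvLexLt_append_left (c u v : List Char) :
    pvLexLt (c ++ u) (c ++ v) = pvLexLt u v := by
  induction c with
  | nil => rfl
  | cons a as ih => simp [pvLexLt, ih]

-- equal lengths, different lists: the concatenation comparison is decided in the first block
theorem pvLexLt_eq_len (a b u v : List Char) (hlen : a.length = b.length) (hne : a ≠ b) :
    pvLexLt (a ++ u) (b ++ v) = pvLexLt a b := by
  induction a generalizing b with
  | nil => cases b with
    | nil => exact absurd rfl hne
    | cons _ _ => simp at hlen
  | cons ca as ih =>
    cases b with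
    | nil => simp at hlen
    | cons cb bs =>
      by_cases h1 : ca < cb
      · simp [pvLexLt, h1]
      · by_cases h2 : cb < ca
        · simp [pvLexLt, h1, h2]
        · have hc : ca = cb := le_antisymm (not_lt.mp h2) (not_lt.mp h1)
          subst hc
          have hne' : as ≠ bs := by intro h; exact hne (by rw [h])
          simp only [pvLexLt, if_neg h1, List.cons_append]
          exact ih bs (by simpa using hlen) hne'

theorem pvScanA_true (a b u v : List Char) (h : pvScanA a b = some true) :
    pvLexLt (b ++ v) (a ++ u) = true ∧ pvLexLt (a ++ u) (b ++ v) = false := by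
  induction a generalizing b with
  | nil => cases b <;> simp [pvScanA] at h
  | cons ca as ih =>
    cases b with
    | nil => simp [pvScanA] at h
    | cons cb bs =>
      by_cases h1 : cb < ca
      · constructor <;> simp [pvLexLt, h1, asymm h1]
      · by_cases h2 : ca < cb
        · simp [pvScanA, h1, h2] at h
        · have := ih bs (by simpa [pvScanA, h1, h2] using h)
          simp only [List.cons_append, pvLexLt, if_neg h1, if_neg h2]
          exact this

theorem pvScanA_false (a b u v : List Char) (h : pvScanA a b = some false) :
    pvLexLt (a ++ u) (b ++ v) = true ∧ pvLexLt (b ++ v) (a ++ u) = false := by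
  induction a generalizing b with
  | nil => cases b <;> simp [pvScanA] at h
  | cons ca as ih =>
    cases b with
    | nil => simp [pvScanA] at h
    | cons cb bs =>
      by_cases h1 : cb < ca
      · simp [pvScanA, h1] at h
      · by_cases h2 : ca < cb
        · constructor <;> simp [pvLexLt, h2, asymm h2]
        · have := ih bs (by simpa [pvScanA, h1, h2] using h)
          simp only [List.cons_append, pvLexLt, if_neg h1, if_neg h2]
          exact this

theorem pvScanA_none (a b : List Char) (h : pvScanA a b = none) :
    a <+: b ∨ b <+: a := by
  induction a generalizing b with
  | nil => exact Or.inl (List.nil_prefix)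
  | cons ca as ih =>
    cases b with
    | nil => exact Or.inr (List.nil_prefix)
    | cons cb bs =>
      by_cases h1 : cb < ca
      · simp [pvScanA, h1] at h
      · by_cases h2 : ca < cb
        · simp [pvScanA, h1, h2] at h
        · have hc : cb = ca := le_antisymm (not_lt.mp h2) (not_lt.mp h1)
          subst hc
          rcases ih bs (by simpa [pvScanA, h1, h2] using h) with hp | hp
          · exact Or.inl (List.cons_prefix_cons.mpr ⟨rfl, hp⟩)
          · exact Or.inr (List.cons_prefix_cons.mpr ⟨rfl, hp⟩)

theorem pvGoA_main (f : Nat) (a b : List Char) (ha : a ≠ []) (hb : b ≠ [])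
    (hne : a ++ b ≠ b ++ a) (hf : a.length + b.length ≤ f) :
    pvGoA f a b = (if pvLexLt (a ++ b) (b ++ a) then b else a) := by
  induction f generalizing a b with
  | zero =>
    exfalso
    have : 0 < a.length := List.length_pos_iff.mpr ha
    omega
  | succ f ih =>
    have hab : a ≠ b := by intro h; exact hne (by rw [h])
    rw [pvGoA]
    rw [if_neg hab]
    by_cases hlen : a.length = b.length
    · rw [if_pos hlen, pvLexLt_eq_len a b b a hlen hab]
      by_cases h : a < b
      · rw [if_pos h, if_pos (pvLexLt_iff_lt a b |>.mpr h)]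
      · rw [if_neg h, if_neg (fun hc => h (pvLexLt_iff_lt a b |>.mp hc))]
    · rw [if_neg hlen]
      cases hscan : pvScanA a b with
      | some dir =>
        cases dir
        · -- some false: return b
          have := pvScanA_false a b b a hscan
          simp [this.1]
        · -- some true: return a
          have := pvScanA_true a b b a hscan
          simp [this.2]
      | none =>
        rcases pvScanA_none a b hscan with hp | hp
        · -- a is a prefix of b, so a.length < b.length
          have hle : a.length ≤ b.length := hp.length_le
          have hlt : a.length < b.length := lt_of_le_of_ne hle hlen
          rw [if_neg (by omega)]
          obtain ⟨b', rfl⟩ := hp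
          have hdrop : (a ++ b').drop a.length = b' := by
            simp
          rw [hdrop]
          have hb' : b' ≠ [] := by
            intro h; subst h; simp at hlt
          have hne' : a ++ b' ≠ b' ++ a := by
            intro h
            apply hne
            calc a ++ (a ++ b') = a ++ (b' ++ a) := by rw [h]
              _ = (a ++ b') ++ a := by rw [List.append_assoc]
          have hf' : a.length + b'.length ≤ f := by
            have : 0 < a.length := List.length_pos_iff.mpr ha
            simp only [List.length_append] at hf
            omega
          rw [ih a b' ha hb' hne' hf']
          have hkey : pvLexLt (a ++ (a ++ b')) ((a ++ b') ++ a)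
              = pvLexLt (a ++ b') (b' ++ a) := by
            rw [List.append_assoc, pvLexLt_append_left]
          by_cases hc : pvLexLt (a ++ b') (b' ++ a) = true
          · have hba : b' ≠ a := by
              intro h; subst h; exact hne' rfl
            rw [if_pos hc, if_neg hba, hkey, if_pos hc]
          · rw [if_neg hc, if_pos rfl, hkey, if_neg hc]
        · -- b is a prefix of a, so b.length < a.length
          have hle : b.length ≤ a.length := hp.length_le
          have hlt : b.length < a.length := lt_of_le_of_ne hle (fun h => hlen h.symm)
          rw [if_pos (by omega)]
          obtain ⟨a', rfl⟩ := hp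
          have hdrop : (b ++ a').drop b.length = a' := by
            simp
          rw [hdrop]
          have ha' : a' ≠ [] := by
            intro h; subst h; simp at hlt
          have hne' : a' ++ b ≠ b ++ a' := by
            intro h
            apply hne
            calc (b ++ a') ++ b = b ++ (a' ++ b) := by rw [List.append_assoc]
              _ = b ++ (b ++ a') := by rw [h]
          have hf' : a'.length + b.length ≤ f := by
            have : 0 < b.length := List.length_pos_iff.mpr hb
            simp only [List.length_append] at hf
            omega
          rw [ih a' b ha' hb hne' hf']
          have hkey : pvLexLt ((b ++ a') ++ b) (b ++ (b ++ a'))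
              = pvLexLt (a' ++ b) (b ++ a') := by
            rw [List.append_assoc, pvLexLt_append_left]
          by_cases hc : pvLexLt (a' ++ b) (b ++ a') = true
          · rw [if_pos hc, if_pos rfl, hkey, if_pos hc]
          · have hab' : a' ≠ b := by
              intro h; subst h; exact hne' rfl
            rw [if_neg hc, if_neg hab', hkey, if_neg hc]

-- ===== VERDICT (by name: the statement is the Claim_ definition above) =====
theorem best_num_spec : Claim_equal_best_num := by
  intro x y _ hpre
  unfold Spec_best_num best_num best_num_alt
  rcases hpre with rfl | hne
  · rw [pvGoA, if_pos rfl, pvLexLt_irrefl, if_neg (by simp), String.ofList_toList]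
  · have ha : x.toList ≠ [] := by
      intro h; apply hne; simp [h]
    have hb : y.toList ≠ [] := by
      intro h; apply hne; simp [h]
    rw [pvGoA_main _ _ _ ha hb hne (by omega)]
    split <;> simp [String.ofList_toList]
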